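-- pv_equiv track=rewrite | github.com/pipecat-ai/gradient-bang | src/gradientbang/scripts/universe_bang.py | collect_two_way_pairs
-- ===== SOURCE A (Python) =====
-- from typing import Dict, List, Set, Tuple, Optional
--
-- def collect_two_way_pairs(warps: Dict[int, Set[int]]) -> Set[Tuple[int, int]]:
--     """Collect all undirected pairs that currently have mutual links.
--     Returns pairs as (min_id, max_id)."""
--     pairs: Set[Tuple[int, int]] = set()
--     for s, neighbors in warps.items():
--         for t in neighbors:
--             if s in warps.get(t, set()):
--                 a, b = (s, t) if s < t else (t, s)
--                 pairs.add((a, b))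
--     return pairs
-- ===== SOURCE B (Python) =====
-- from typing import Dict, List, Set, Tuple, Optional
--
-- def collect_two_way_pairs(warps: Dict[int, Set[int]]) -> Set[Tuple[int, int]]:
--     """Collect all undirected pairs that currently have mutual links.
--     Returns pairs as (min_id, max_id)."""
--     counts: Dict[Tuple[int, int], int] = {}
--     for s, neighbors in warps.items():
--         for t in neighbors:
--             key = (min(s, t), max(s, t))
--             counts[key] = counts.get(key, 0) + 1
--     return {p for p, c in counts.items() if c == 2 or p[0] == p[1]}
-- ===== Notes on version B (the rewrite author's own statement) =====
-- stated objective: alternative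
-- what changed: Replaces the per-edge reverse-lookup probe (s in warps.get(t, set())) by a counting pass: tally each normalized (min,max) edge key in one dict, then keep exactly the keys tallied twice (both directions present) or with equal endpoints (self-loop); no membership test against the graph is performed at all.
import Mathlib
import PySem

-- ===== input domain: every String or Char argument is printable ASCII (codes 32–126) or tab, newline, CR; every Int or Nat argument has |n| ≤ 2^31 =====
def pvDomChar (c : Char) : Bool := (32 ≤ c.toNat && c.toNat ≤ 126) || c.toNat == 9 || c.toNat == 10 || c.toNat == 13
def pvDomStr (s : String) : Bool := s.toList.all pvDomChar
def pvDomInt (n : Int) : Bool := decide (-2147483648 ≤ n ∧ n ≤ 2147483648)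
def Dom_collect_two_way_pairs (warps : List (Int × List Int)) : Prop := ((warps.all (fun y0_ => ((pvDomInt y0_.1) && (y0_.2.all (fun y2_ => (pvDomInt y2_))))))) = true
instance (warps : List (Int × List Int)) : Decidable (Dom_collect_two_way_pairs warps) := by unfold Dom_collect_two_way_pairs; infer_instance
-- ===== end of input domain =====

-- B replaces A's per-edge reverse-lookup probe by a counting pass over normalized edge keys
-- (mutual iff the key is tallied twice, or is a self-loop); alternative algorithm, no speed claim.


-- ===== PORT A =====
def collect_two_way_pairs (warps : List (Int × List Int)) : List (Int × Int) :=
  warps.foldl (fun pairs p =>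
    p.2.foldl (fun pairs t =>
      if p.1 ∈ (PySem.Dict.mk warps).getD t [] then
        PySem.Set.add pairs (if p.1 < t then (p.1, t) else (t, p.1))
      else pairs) pairs) ([] : PySem.Set (Int × Int))

-- ===== PORT B =====
def collect_two_way_pairs_alt (warps : List (Int × List Int)) : List (Int × Int) :=
  let counts : PySem.Dict (Int × Int) Int :=
    warps.foldl (fun counts p =>
      p.2.foldl (fun counts t =>
        let key := (min p.1 t, max p.1 t)
        counts.insert key (counts.getD key 0 + 1)) counts) PySem.Dict.empty
  PySem.Set.ofList
    ((counts.items.filter (fun pc => pc.2 == 2 || pc.1.1 == pc.1.2)).map Prod.fst)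

-- ===== PRECONDITION & SPEC =====
-- Pre_ excludes association lists with duplicate keys or duplicate elements inside a
-- neighbour list: those do not represent any value of A's declared parameter type
-- Dict[int, Set[int]], so A is never run on them.
def Pre_collect_two_way_pairs (warps : List (Int × List Int)) : Prop :=
  (warps.map Prod.fst).Nodup ∧ ∀ p ∈ warps, p.2.Nodup
instance (warps : List (Int × List Int)) : Decidable (Pre_collect_two_way_pairs warps) := by unfold Pre_collect_two_way_pairs; infer_instance
def pvWitness_collect_two_way_pairs : (List (Int × List Int)) := [(1, [2, 3]), (2, [1]), (3, [])]
def Spec_collect_two_way_pairs (warps : List (Int × List Int)) (out : List (Int × Int)) : Prop := out = collect_two_way_pairs_alt warps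
instance (warps : List (Int × List Int)) (out : List (Int × Int)) : Decidable (Spec_collect_two_way_pairs warps out) := by unfold Spec_collect_two_way_pairs; infer_instance

-- ===== CLAIM (what is proved, stated in full; the proofs are below) =====
def Claim_equal_collect_two_way_pairs : Prop := ∀ (warps : List (Int × List Int)), Dom_collect_two_way_pairs warps → Pre_collect_two_way_pairs warps → Spec_collect_two_way_pairs warps (collect_two_way_pairs warps)

-- ===== LEMMAS AND PROOFS =====

-- the directed edge list, in the shared traversal order
def pvEdges (warps : List (Int × List Int)) : List (Int × Int) :=
  warps.flatMap (fun p => p.2.map (fun t => (p.1, t)))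

def pvNorm (e : Int × Int) : Int × Int := (min e.1 e.2, max e.1 e.2)
def pvNormA (e : Int × Int) : Int × Int := if e.1 < e.2 then (e.1, e.2) else (e.2, e.1)
def pvCondA (warps : List (Int × List Int)) (e : Int × Int) : Bool :=
  decide (e.1 ∈ (PySem.Dict.mk warps).getD e.2 [])
-- B's keep-test, as a predicate on the normalized key
def pvP (norms : List (Int × Int)) (k : Int × Int) : Bool :=
  ((norms.count k : Int) == 2) || (k.1 == k.2)

lemma pvNorm_eq : pvNorm = pvNormA := by
  funext e
  unfold pvNorm pvNormA
  by_cases h : e.1 < e.2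
  · simp [h, le_of_lt h]
  · have h2 : e.2 ≤ e.1 := le_of_not_gt h
    simp [h, h2]

lemma pvFoldIf {α β : Type} [BEq β] (c : α → Bool) (f : α → β) :
    ∀ (l : List α) (acc : PySem.Set β),
      l.foldl (fun pairs e => if c e then PySem.Set.add pairs (f e) else pairs) acc
        = ((l.filter c).map f).foldl PySem.Set.add acc := by
  intro l
  induction l with
  | nil => intro acc; rfl
  | cons x xs ih =>
    intro acc
    by_cases h : c x = true
    · simp [List.foldl, h, ih]
    · simp [List.foldl, List.filter, h, ih]

lemma pvA_eq_fold (warps : List (Int × List Int)) :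
    collect_two_way_pairs warps
      = PySem.Set.ofList (((pvEdges warps).filter (pvCondA warps)).map pvNormA) := by
  rw [PySem.Set.ofList_eq_foldl, ← pvFoldIf]
  unfold collect_two_way_pairs
  have : ∀ (ws : List (Int × List Int)) (acc : PySem.Set (Int × Int)),
      ws.foldl (fun pairs p =>
        p.2.foldl (fun pairs t =>
          if p.1 ∈ (PySem.Dict.mk warps).getD t [] then
            PySem.Set.add pairs (if p.1 < t then (p.1, t) else (t, p.1))
          else pairs) pairs) acc
        = (pvEdges ws).foldl (fun pairs e =>
            if pvCondA warps e then PySem.Set.add pairs (pvNormA e) else pairs) acc := by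
    intro ws
    induction ws with
    | nil => intro acc; rfl
    | cons p rest ih =>
      intro acc
      simp only [List.foldl_cons, pvEdges, List.flatMap_cons, List.foldl_append, List.foldl_map, ih]
      congr 1
      · simp [pvCondA, pvNormA]
  exact this warps []

-- B's tally is the counter of the normalized edge keys
lemma pvB_counts (warps : List (Int × List Int)) :
    warps.foldl (fun counts p =>
      p.2.foldl (fun counts t =>
        let key := (min p.1 t, max p.1 t)
        counts.insert key (counts.getD key 0 + 1)) counts)
      (PySem.Dict.empty : PySem.Dict (Int × Int) Int)
      = PySem.Dict.counter ((pvEdges warps).map pvNorm) := by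
  rw [← PySem.Dict.foldl_insert_getD_add_one_eq_counter, List.foldl_map]
  have : ∀ (ws : List (Int × List Int)) (init : PySem.Dict (Int × Int) Int),
      ws.foldl (fun counts p =>
        p.2.foldl (fun counts t =>
          let key := (min p.1 t, max p.1 t)
          counts.insert key (counts.getD key 0 + 1)) counts) init
        = (pvEdges ws).foldl (fun d e =>
            d.insert (pvNorm e) (d.getD (pvNorm e) 0 + 1)) init := by
    intro ws
    induction ws with
    | nil => intro init; rfl
    | cons p rest ih =>
      intro init
      simp only [List.foldl_cons, pvEdges, List.flatMap_cons, List.foldl_append, List.foldl_map, ih]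
      rfl
  exact this warps _

lemma pvGetD_mem_iff (warps : List (Int × List Int))
    (hN : (warps.map Prod.fst).Nodup) (s t : Int) :
    s ∈ (PySem.Dict.mk warps).getD t [] ↔ (t, s) ∈ pvEdges warps := by
  have hkeys : (PySem.Dict.mk warps).keys = warps.map Prod.fst := by
    simp [PySem.Dict.keys]
  have hKN : (PySem.Dict.mk warps).keys.Nodup := by rw [hkeys]; exact hN
  have hmain : s ∈ (PySem.Dict.mk warps).getD t [] ↔ ∃ ns, (t, ns) ∈ warps ∧ s ∈ ns := by
    constructor
    · intro hs
      by_cases hc : (PySem.Dict.mk warps).contains t = true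
      · have ht : t ∈ warps.map Prod.fst := by
          rw [← hkeys]; exact (PySem.Dict.contains_iff_mem_keys _ _).mp hc
        obtain ⟨⟨a, b⟩, hp, hpt⟩ := List.mem_map.mp ht
        simp only at hpt
        subst hpt
        refine ⟨b, hp, ?_⟩
        rwa [PySem.Dict.getD_of_mem_items _ hp hKN] at hs
      · rw [PySem.Dict.getD_of_not_contains _ _ (Bool.eq_false_iff.mpr hc)] at hs
        simp at hs
    · rintro ⟨ns, hmem, hs⟩
      rwa [PySem.Dict.getD_of_mem_items _ hmem hKN]
  rw [hmain]
  unfold pvEdges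
  rw [List.mem_flatMap]
  constructor
  · rintro ⟨ns, hmem, hs⟩
    exact ⟨(t, ns), hmem, List.mem_map.mpr ⟨s, hs, rfl⟩⟩
  · rintro ⟨⟨a, b⟩, hp, hin⟩
    obtain ⟨u, hu, heq⟩ := List.mem_map.mp hin
    injection heq with h1 h2
    subst h1; subst h2
    exact ⟨b, hp, hu⟩

lemma pvEdges_nodup (warps : List (Int × List Int))
    (hPre : Pre_collect_two_way_pairs warps) : (pvEdges warps).Nodup := by
  obtain ⟨hK, hV⟩ := hPre
  induction warps with
  | nil => simp [pvEdges]
  | cons p rest ih =>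
    simp only [pvEdges, List.flatMap_cons]
    apply List.Nodup.append
    · exact (hV p (List.mem_cons_self)).map (fun a b h => by injection h)
    · exact ih ((List.nodup_cons.mp hK).2) (fun q hq => hV q (List.mem_cons_of_mem _ hq))
    · intro e he1 he2
      obtain ⟨t, _, rfl⟩ := List.mem_map.mp he1
      obtain ⟨⟨a, b⟩, hq, hin⟩ := List.mem_flatMap.mp he2
      obtain ⟨u, _, heq⟩ := List.mem_map.mp hin
      have ha : a = p.1 := by injection heq.symm with h1 _; exact h1.symm
      have : p.1 ∈ rest.map Prod.fst := ha ▸ List.mem_map.mpr ⟨(a, b), hq, rfl⟩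
      simp only [List.map_cons, List.nodup_cons] at hK
      exact hK.1 this

-- the fiber of the normalization map over a non-degenerate key
lemma pvNormFiber (x e : Int × Int) (h : e.1 ≠ e.2) :
    pvNorm x = pvNorm e ↔ (x = e ∨ x = (e.2, e.1)) := by
  obtain ⟨x1, x2⟩ := x; obtain ⟨s, t⟩ := e
  simp only [pvNorm, Prod.mk.injEq] at *
  constructor
  · rintro ⟨h1, h2⟩
    simp only [min_def, max_def] at h1 h2
    split_ifs at h1 h2 <;> omega
  · rintro (⟨rfl, rfl⟩ | ⟨rfl, rfl⟩)
    · exact ⟨rfl, rfl⟩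
    · exact ⟨min_comm _ _, max_comm _ _⟩

lemma pvCountPPair {α : Type} [BEq α] [LawfulBEq α] (a b : α) (hab : a ≠ b) (l : List α) :
    l.countP (fun x => (x == a) || (x == b)) = l.count a + l.count b := by
  induction l with
  | nil => simp
  | cons x xs ih =>
    by_cases hx : x = a
    · by_cases hy : x = b
      · exact absurd (hx.symm.trans hy) hab
      · subst hx; simp [ih, Ne.symm hab, hy]; omega
    · by_cases hy : x = b
      · subst hy; simp [ih, hab, hx]; omega
      · simp [ih, hx, hy]
-- A's per-edge reverse-lookup test equals B's tally test, on edges of the graph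
lemma pvCond_eq (warps : List (Int × List Int))
    (hPre : Pre_collect_two_way_pairs warps) (e : Int × Int) (he : e ∈ pvEdges warps) :
    pvCondA warps e = pvP ((pvEdges warps).map pvNorm) (pvNorm e) := by
  have hND := pvEdges_nodup warps hPre
  have hmem : pvCondA warps e = decide ((e.2, e.1) ∈ pvEdges warps) := by
    unfold pvCondA
    simp only [pvGetD_mem_iff warps hPre.1 e.1 e.2]
  by_cases hse : e.1 = e.2
  · -- self-loop: both sides are true
    have : (e.2, e.1) = e := by obtain ⟨a, b⟩ := e; simp_all
    rw [hmem, this]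
    simp [pvP, pvNorm, he, hse]
  · -- proper edge: count of the key is 1 + (reverse present)
    have hcount : ((pvEdges warps).map pvNorm).count (pvNorm e)
        = (pvEdges warps).count e + (pvEdges warps).count (e.2, e.1) := by
      rw [List.count_eq_countP, List.countP_map]
      have hcg : ∀ x ∈ pvEdges warps,
          ((fun x => x == pvNorm e) ∘ pvNorm) x = true
            ↔ (fun x => (x == e) || (x == (e.2, e.1))) x = true := by
        intro x _
        simp only [Function.comp, beq_iff_eq, Bool.or_eq_true]
        exact pvNormFiber x e hse
      rw [List.countP_congr hcg]
      exact pvCountPPair e (e.2, e.1)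
        (fun hcon => hse (congrArg Prod.fst hcon)) _
    have h1 : (pvEdges warps).count e = 1 := List.count_eq_one_of_mem hND he
    have hle : (pvEdges warps).count (e.2, e.1) ≤ 1 :=
      List.nodup_iff_count_le_one.mp hND _
    have hrev : (e.2, e.1) ∈ pvEdges warps ↔ (pvEdges warps).count (e.2, e.1) = 1 := by
      rw [← List.count_pos_iff]; omega
    rw [hmem]
    unfold pvP
    have hne : (pvNorm e).1 ≠ (pvNorm e).2 := by
      unfold pvNorm; simp only []
      rcases le_total e.1 e.2 with h | h <;> simp [*] <;> omega
    by_cases hr : (e.2, e.1) ∈ pvEdges warps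
    · have : ((pvEdges warps).map pvNorm).count (pvNorm e) = 2 := by
        rw [hcount, h1, hrev.mp hr]
      simp [hr, this]
    · have : ((pvEdges warps).map pvNorm).count (pvNorm e) = 1 := by
        have : (pvEdges warps).count (e.2, e.1) = 0 := by
          rcases Nat.lt_or_ge 0 ((pvEdges warps).count (e.2, e.1)) with h | h
          · exact absurd (List.count_pos_iff.mp h) hr
          · omega
        rw [hcount, h1, this]
      simp [hr, this, hne]
  -- first-occurrence dedup commutes with an element-wise filter
lemma pvOfList_filter {α : Type} [BEq α] [LawfulBEq α] (p : α → Bool) (L : List α) :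
    PySem.Set.ofList (L.filter p) = (PySem.Set.ofList L).filter p := by
  induction L using List.reverseRecOn with
  | nil => rfl
  | append_singleton xs x ih =>
    rw [List.filter_append, PySem.Set.ofList_append_singleton]
    by_cases hx : x ∈ PySem.Set.ofList xs
    · rw [PySem.Set.add_of_mem hx]
      have hx' : x ∈ xs := by
        have := PySem.Set.mem_ofList (xs := xs) (y := x)
        exact this.mp hx
      by_cases hp : p x = true
      · simp only [List.filter_cons, hp, if_pos, List.filter_nil]
        rw [PySem.Set.ofList_append_singleton, ih]
        exact PySem.Set.add_of_mem (List.mem_filter.mpr ⟨hx, hp⟩)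
      · simp [hp, ih]
    · rw [PySem.Set.add_of_not_mem hx, List.filter_append]
      by_cases hp : p x = true
      · simp only [List.filter_cons, hp, if_pos, List.filter_nil]
        rw [PySem.Set.ofList_append_singleton, ih]
        exact PySem.Set.add_of_not_mem (fun hcon => hx (List.mem_filter.mp hcon).1)
      · simp [hp, ih]

-- ===== VERDICT (by name: the statement is the Claim_ definition above) =====
theorem collect_two_way_pairs_spec : Claim_equal_collect_two_way_pairs := by
  intro warps _ hPre
  unfold Spec_collect_two_way_pairs
  unfold collect_two_way_pairs_alt
  simp only []
  rw [pvB_counts, PySem.Dict.items_counter]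
  rw [List.filter_map, List.map_map]
  rw [show ((fun pc : (Int × Int) × Int => pc.2 == 2 || pc.1.1 == pc.1.2) ∘
        (fun k => (k, (((pvEdges warps).map pvNorm).count k : Int))))
      = pvP ((pvEdges warps).map pvNorm) from by funext k; simp [pvP]]
  rw [show (Prod.fst ∘ (fun k : Int × Int => (k, (((pvEdges warps).map pvNorm).count k : Int))))
      = id from by funext k; rfl]
  rw [List.map_id]
  have hnd : (List.filter (pvP ((pvEdges warps).map pvNorm))
      (PySem.Set.ofList ((pvEdges warps).map pvNorm))).Nodup :=
    (PySem.Set.nodup_ofList _).filter _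
  rw [PySem.Set.ofList_eq_self_of_nodup _ hnd]
  rw [pvA_eq_fold, ← pvNorm_eq]
  rw [List.filter_congr (fun e he => pvCond_eq warps hPre e he)]
  rw [show (fun e => pvP ((pvEdges warps).map pvNorm) (pvNorm e))
      = (pvP ((pvEdges warps).map pvNorm) ∘ pvNorm) from rfl]
  rw [← List.filter_map, pvOfList_filter]
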